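-- pv_equiv track=rewrite | github.com/Aigul9/hanabi-stats | py/notes_vocabulary.py | get_voc_comparison
-- ===== SOURCE A (Python) =====
-- def get_voc_comparison(user_word_frequency_dict):
--     """Creates a pivot table from users' vocabularies.
--
--     Parameters
--     ----------
--     user_word_frequency_dict : dict
--         Number of notes by word for each player
--
--     Returns
--     -------
--     user_word_frequency_pivot : dict
--         Pivot table containing percentage of similarities between two vocabularies
--     """
--     user_word_frequency_pivot = {}
--     for player, word_frequency_dict in user_word_frequency_dict.items():
--         player_comparison_list = []
--         for frequency in user_word_frequency_dict.values():
--             player_comparison_list.append(f'{compare(word_frequency_dict, frequency)}%')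
--         user_word_frequency_pivot[player] = player_comparison_list
--     return user_word_frequency_pivot
--
-- def compare(word_frequency_dict1, word_frequency_dict2):
--     """Calculates percentage of comparison between two users' vocabularies.
--
--     Parameters
--     ----------
--     word_frequency_dict1 : dict
--         Number of notes by word of the first player
--     word_frequency_dict2 : dict
--         Number of notes by word of the second player
--     Returns
--     -------
--     int
--         Percentage of similarities
--     """
--     words_count1 = len(word_frequency_dict1)
--     common_words_count = len(word_frequency_dict1.keys() & word_frequency_dict2.keys())
--     try:
--         return round(common_words_count / words_count1 * 100)
--     except ZeroDivisionError:
--         return 0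
-- ===== SOURCE B (Python) =====
-- def get_voc_comparison(user_word_frequency_dict):
--     """Pivot of vocabulary-overlap percentages, via an inverted word->players index."""
--     players = list(user_word_frequency_dict)
--     # inverted index: word -> players whose vocabulary contains it (in player order)
--     index = {}
--     for player, word_frequency_dict in user_word_frequency_dict.items():
--         for word in word_frequency_dict:
--             index.setdefault(word, []).append(player)
--     # co-occurrence counts: (p1, p2) -> number of shared words
--     pair_counts = {}
--     for sharers in index.values():
--         for p1 in sharers:
--             for p2 in sharers:
--                 pair_counts[p1, p2] = pair_counts.get((p1, p2), 0) + 1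
--     pivot = {}
--     for p1 in players:
--         words_count = len(user_word_frequency_dict[p1])
--         try:
--             pivot[p1] = [f'{round(pair_counts.get((p1, p2), 0) / words_count * 100)}%'
--                          for p2 in players]
--         except ZeroDivisionError:
--             pivot[p1] = ['0%'] * len(players)
--     return pivot
-- ===== Notes on version B (the rewrite author's own statement) =====
-- stated objective: alternative
-- what changed: Instead of recomputing a key-set intersection for every ordered pair of players, B builds an inverted word-to-players index once, accumulates pairwise co-occurrence counts from it, and then assembles each row from those counts.
import Mathlib
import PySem

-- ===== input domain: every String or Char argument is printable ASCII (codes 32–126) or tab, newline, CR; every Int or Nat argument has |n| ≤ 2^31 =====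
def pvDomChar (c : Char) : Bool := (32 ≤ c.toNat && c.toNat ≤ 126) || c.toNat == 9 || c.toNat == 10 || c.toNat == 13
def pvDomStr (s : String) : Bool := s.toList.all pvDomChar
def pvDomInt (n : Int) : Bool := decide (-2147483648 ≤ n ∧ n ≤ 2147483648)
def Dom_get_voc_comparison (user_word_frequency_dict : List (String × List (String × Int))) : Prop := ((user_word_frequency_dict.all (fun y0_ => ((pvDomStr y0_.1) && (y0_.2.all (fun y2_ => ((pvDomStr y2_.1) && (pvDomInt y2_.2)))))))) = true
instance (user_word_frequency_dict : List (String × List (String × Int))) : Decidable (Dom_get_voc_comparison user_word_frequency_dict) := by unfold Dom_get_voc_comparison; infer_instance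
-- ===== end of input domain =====

-- B replaces A's quadratic pairwise set-intersection scan by an inverted word→players index
-- with pair co-occurrence counts (objective: alternative decomposition; return values identical).

-- ===== PORT A =====
-- round(c / n * 100) for n ≠ 0: hand-written exact model of CPython's IEEE-754 double
-- arithmetic (c/n rounded to nearest-even double, ×100 rounded again, round() half-to-even);
-- exact for |c|,|n| ≤ 2^31 as both Pythons only reach 0 ≤ c ≤ n there.  Shared by both ports,
-- which contain the identical Python expression.
def pvNearestEven (q : ℚ) : Int :=
  let f : Int := ⌊q⌋
  if q - (f : ℚ) < 1/2 then f
  else if (1 : ℚ)/2 < q - (f : ℚ) then f + 1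
  else if f % 2 = 0 then f else f + 1

def pvToDouble (q : ℚ) : ℚ :=
  if q = 0 then 0
  else
    let e0 : Int := (PySem.Int.bitLength q.num : Int) - (PySem.Int.bitLength (q.den : Int) : Int)
    let e : Int := if q < (2 : ℚ) ^ e0 then e0 - 1 else e0
    ((pvNearestEven (q * (2 : ℚ) ^ (52 - e)) : Int) : ℚ) * (2 : ℚ) ^ (e - 52)

def pvRound100 (c n : Int) : Int :=
  pvNearestEven (pvToDouble (pvToDouble ((c : ℚ) / (n : ℚ)) * 100))

-- keys of a Python dict given as an association list: its distinct keys in first-occurrence order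
def pvKeys (v : List (String × Int)) : PySem.Set String :=
  PySem.Set.ofList (v.map Prod.fst)

-- compare(d1, d2): len(d1), len(d1.keys() & d2.keys()), try round(...) except ZeroDivisionError → 0
def pvCompare (w1 w2 : List (String × Int)) : Int :=
  let wordsCount1 : Int := ((pvKeys w1).length : Int)
  let commonWordsCount : Int := ((PySem.Set.inter (pvKeys w1) (pvKeys w2)).length : Int)
  if wordsCount1 = 0 then 0 else pvRound100 commonWordsCount wordsCount1

def get_voc_comparison (user_word_frequency_dict : List (String × List (String × Int))) : List (String × List String) :=
  let d : PySem.Dict String (List (String × Int)) := PySem.Dict.ofList user_word_frequency_dict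
  (d.items.foldl (fun piv e =>
      piv.insert e.1
        (d.values.foldl (fun row freq => row ++ [PySem.Int.toStr (pvCompare e.2 freq) ++ "%"]) []))
    (PySem.Dict.empty : PySem.Dict String (List String))).items

-- ===== PORT B =====
def get_voc_comparison_alt (user_word_frequency_dict : List (String × List (String × Int))) : List (String × List String) :=
  let d : PySem.Dict String (List (String × Int)) := PySem.Dict.ofList user_word_frequency_dict
  let players : List String := d.keys
  -- index.setdefault(word, []).append(player): new words append at the end, existing keep place
  let index : PySem.Dict String (List String) :=
    d.items.foldl (fun ix e =>
        (pvKeys e.2).foldl (fun ix w => ix.insert w (ix.getD w [] ++ [e.1])) ix)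
      (PySem.Dict.empty : PySem.Dict String (List String))
  let pairCounts : PySem.Dict (String × String) Int :=
    index.values.foldl (fun pc sharers =>
        sharers.foldl (fun pc p1 =>
            sharers.foldl (fun pc p2 => pc.insert (p1, p2) (pc.getD (p1, p2) 0 + 1)) pc)
          pc)
      (PySem.Dict.empty : PySem.Dict (String × String) Int)
  let pivot : PySem.Dict String (List String) :=
    players.foldl (fun piv p1 =>
        let wordsCount : Int := ((pvKeys (d.getD p1 [])).length : Int)
        -- try/except ZeroDivisionError: the whole comprehension collapses to ['0%'] * len(players)
        piv.insert p1
          (if wordsCount = 0 then List.replicate players.length "0%"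
           else players.map (fun p2 =>
              PySem.Int.toStr (pvRound100 (pairCounts.getD (p1, p2) 0) wordsCount) ++ "%")))
      (PySem.Dict.empty : PySem.Dict String (List String))
  pivot.items

-- ===== PRECONDITION & SPEC =====
def Spec_get_voc_comparison (user_word_frequency_dict : List (String × List (String × Int))) (out : List (String × List String)) : Prop := out = get_voc_comparison_alt user_word_frequency_dict
instance (user_word_frequency_dict : List (String × List (String × Int))) (out : List (String × List String)) : Decidable (Spec_get_voc_comparison user_word_frequency_dict out) := by unfold Spec_get_voc_comparison; infer_instance

-- ===== CLAIM (what is proved, stated in full; the proofs are below) =====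
def Claim_equal_get_voc_comparison : Prop := ∀ (user_word_frequency_dict : List (String × List (String × Int))), Dom_get_voc_comparison user_word_frequency_dict → Spec_get_voc_comparison user_word_frequency_dict (get_voc_comparison user_word_frequency_dict)

-- ===== LEMMAS AND PROOFS =====

-- the inner index loop: one player's (distinct) words each get the player appended once
theorem pv_idx_inner (Ks : List String) (hK : Ks.Nodup) (p : String)
    (ix : PySem.Dict String (List String)) (w : String) :
    ((Ks.foldl (fun ix w => ix.insert w (ix.getD w [] ++ [p])) ix).getD w []) =
      ix.getD w [] ++ (if w ∈ Ks then [p] else []) := by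
  induction Ks generalizing ix with
  | nil => simp
  | cons a Ks ih =>
    have ha : a ∉ Ks := (List.nodup_cons.1 hK).1
    simp only [List.foldl_cons]
    rw [ih (List.nodup_cons.1 hK).2, PySem.Dict.getD_insert]
    by_cases hw : w = a
    · subst hw; simp [ha]
    · simp [hw]

-- the index: index[w] lists exactly the players whose vocabulary contains w, in item order
theorem pv_idx_getD (items : List (String × List (String × Int)))
    (ix : PySem.Dict String (List String)) (w : String) :
    ((items.foldl (fun ix e =>
        (pvKeys e.2).foldl (fun ix w => ix.insert w (ix.getD w [] ++ [e.1])) ix) ix).getD w []) =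
      ix.getD w [] ++ (items.filter (fun e => decide (w ∈ pvKeys e.2))).map Prod.fst := by
  induction items generalizing ix with
  | nil => simp
  | cons e items ih =>
    simp only [List.foldl_cons]
    have hnd : (pvKeys e.2).Nodup := by unfold pvKeys; exact PySem.Set.nodup_ofList _
    rw [ih, pv_idx_inner _ hnd _ _ _]
    by_cases hw : w ∈ pvKeys e.2 <;> simp [hw]

theorem pv_idx_mem_keys (items : List (String × List (String × Int)))
    (ix : PySem.Dict String (List String)) (w : String) :
    (w ∈ (items.foldl (fun ix e =>
        (pvKeys e.2).foldl (fun ix w => ix.insert w (ix.getD w [] ++ [e.1])) ix) ix).keys) ↔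
      w ∈ ix.keys ∨ ∃ e ∈ items, w ∈ pvKeys e.2 := by
  induction items generalizing ix with
  | nil => simp
  | cons e items ih =>
    simp only [List.foldl_cons]
    rw [ih]
    rw [PySem.Dict.keys_foldl_insert]
    simp only [PySem.Set.mem_update, List.mem_cons]
    constructor
    · rintro ((h | h) | ⟨e', he', hw⟩)
      · exact Or.inl h
      · exact Or.inr ⟨e, Or.inl rfl, h⟩
      · exact Or.inr ⟨e', Or.inr he', hw⟩
    · rintro (h | ⟨e', (rfl | he'), hw⟩)
      · exact Or.inl (Or.inl h)
      · exact Or.inl (Or.inr hw)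
      · exact Or.inr ⟨e', he', hw⟩

theorem pv_idx_nodup_keys (items : List (String × List (String × Int)))
    (ix : PySem.Dict String (List String)) (h : ix.keys.Nodup) :
    ((items.foldl (fun ix e =>
        (pvKeys e.2).foldl (fun ix w => ix.insert w (ix.getD w [] ++ [e.1])) ix) ix).keys).Nodup := by
  induction items generalizing ix with
  | nil => exact h
  | cons e items ih =>
    simp only [List.foldl_cons]
    exact ih _ (PySem.Dict.nodup_keys_foldl_insert _ _ _ h)

-- innermost pair-count loop (fixed p1)
theorem pv_pc_inner (S : List String) (p1 : String)
    (pc : PySem.Dict (String × String) Int) (k : String × String) :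
    ((S.foldl (fun pc p2 => pc.insert (p1, p2) (pc.getD (p1, p2) 0 + 1)) pc).getD k 0) =
      pc.getD k 0 + (if k.1 = p1 then (S.count k.2 : Int) else 0) := by
  have hmap : S.foldl (fun pc p2 => pc.insert (p1, p2) (pc.getD (p1, p2) 0 + 1)) pc =
      (S.map (fun p2 => (p1, p2))).foldl (fun pc x => pc.insert x (pc.getD x 0 + 1)) pc := by
    rw [List.foldl_map]
  rw [hmap, PySem.Dict.getD_foldl_insert_add_one]
  by_cases hk : k.1 = p1
  · have hinj : Function.Injective (fun p2 => (p1, p2) : String → String × String) := by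
      intro x y hxy; simpa using hxy
    have hkk : k = (p1, k.2) := by cases k; simp_all
    rw [hkk]
    simp [List.count_map_of_injective _ _ hinj]
  · have hz : (S.map (fun p2 => (p1, p2))).count k = 0 := by
      rw [List.count_eq_zero]
      intro hmem
      rcases List.mem_map.1 hmem with ⟨x, _, hx⟩
      exact hk (by rw [← hx])
    simp [hz, hk]

-- middle loop
theorem pv_pc_mid (T S : List String) (pc : PySem.Dict (String × String) Int) (k : String × String) :
    ((T.foldl (fun pc p1 =>
        S.foldl (fun pc p2 => pc.insert (p1, p2) (pc.getD (p1, p2) 0 + 1)) pc) pc).getD k 0) =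
      pc.getD k 0 + (T.count k.1 : Int) * (S.count k.2 : Int) := by
  induction T generalizing pc with
  | nil => simp
  | cons a T ih =>
    simp only [List.foldl_cons]
    rw [ih, pv_pc_inner, List.count_cons]
    by_cases hk : k.1 = a
    · simp only [hk, beq_self_eq_true, if_true]
      push_cast
      ring
    · have h1 : (a == k.1) = false := by simp [Ne.symm hk]
      have h2 : (k.1 == a) = false := by simp [hk]
      simp only [h1, if_neg hk, if_false, Bool.false_eq_true]
      push_cast
      ring

-- outer loop over the index's value lists
theorem pv_pc_outer (Ss : List (List String)) (pc : PySem.Dict (String × String) Int)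
    (k : String × String) :
    ((Ss.foldl (fun pc S =>
        S.foldl (fun pc p1 =>
          S.foldl (fun pc p2 => pc.insert (p1, p2) (pc.getD (p1, p2) 0 + 1)) pc) pc) pc).getD k 0) =
      pc.getD k 0 + ((Ss.map (fun S => (S.count k.1 : Int) * (S.count k.2 : Int))).sum) := by
  induction Ss generalizing pc with
  | nil => simp
  | cons S Ss ih =>
    simp only [List.foldl_cons, List.map_cons, List.sum_cons]
    rw [ih, pv_pc_mid]
    ring

-- two entries of a key-nodup item list with the same key are equal
theorem pv_eq_of_fst_eq {α β : Type} {l : List (α × β)} (h : (l.map Prod.fst).Nodup)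
    {e e' : α × β} (he : e ∈ l) (he' : e' ∈ l) (hfst : e.1 = e'.1) : e = e' := by
  exact List.inj_on_of_nodup_map h he he' hfst

-- counting over any nodup superlist of K v1: countP equals the intersection size
theorem pv_countP_inter (ks : List String) (hks : ks.Nodup)
    (v1 v2 : List (String × Int)) (hsub : ∀ w ∈ pvKeys v1, w ∈ ks) :
    (ks.countP (fun w => decide (w ∈ pvKeys v1 ∧ w ∈ pvKeys v2)) : Int) =
      ((PySem.Set.inter (pvKeys v1) (pvKeys v2)).length : Int) := by
  congr 1
  rw [List.countP_eq_length_filter]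
  apply List.Perm.length_eq
  have hin : (PySem.Set.inter (pvKeys v1) (pvKeys v2)).Nodup := by
    unfold pvKeys; exact PySem.Set.nodup_inter _ _ (PySem.Set.nodup_ofList _)
  apply (List.perm_ext_iff_of_nodup (hks.filter _) hin).2
  intro a
  simp only [List.mem_filter, PySem.Set.mem_inter, decide_eq_true_eq]
  constructor
  · rintro ⟨_, h1, h2⟩; exact ⟨h1, h2⟩
  · rintro ⟨h1, h2⟩; exact ⟨hsub a h1, h1, h2⟩

-- the co-occurrence table built from the inverted index holds exactly the intersection sizes
theorem pv_pairCounts (d : PySem.Dict String (List (String × Int))) (hnd : d.keys.Nodup)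
    (p1 : String) (v1 : List (String × Int)) (p2 : String) (v2 : List (String × Int))
    (h1 : (p1, v1) ∈ d.items) (h2 : (p2, v2) ∈ d.items) :
    (((d.items.foldl (fun ix e =>
          (pvKeys e.2).foldl (fun ix w => ix.insert w (ix.getD w [] ++ [e.1])) ix)
        (PySem.Dict.empty : PySem.Dict String (List String))).values.foldl
        (fun pc sharers =>
          sharers.foldl (fun pc p1 =>
              sharers.foldl (fun pc p2 => pc.insert (p1, p2) (pc.getD (p1, p2) 0 + 1)) pc) pc)
        (PySem.Dict.empty : PySem.Dict (String × String) Int)).getD (p1, p2) 0) =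
      ((PySem.Set.inter (pvKeys v1) (pvKeys v2)).length : Int) := by
  have hfstnd : (d.items.map Prod.fst).Nodup := by simpa [PySem.Dict.keys] using hnd
  set idx := d.items.foldl (fun ix e =>
      (pvKeys e.2).foldl (fun ix w => ix.insert w (ix.getD w [] ++ [e.1])) ix)
    (PySem.Dict.empty : PySem.Dict String (List String)) with hidx
  have hkeysnd : idx.keys.Nodup := by
    rw [hidx]; exact pv_idx_nodup_keys _ _ (by simp [PySem.Dict.keys_empty])
  rw [pv_pc_outer, PySem.Dict.getD_empty, PySem.Dict.values_eq_map_keys idx hkeysnd [], List.map_map]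
  have hS : ∀ w, idx.getD w [] =
      (d.items.filter (fun e => decide (w ∈ pvKeys e.2))).map Prod.fst := by
    intro w
    rw [hidx, pv_idx_getD]
    simp [PySem.Dict.getD_empty]
  have hcnt : ∀ (p : String) (v : List (String × Int)), (p, v) ∈ d.items → ∀ w : String,
      ((d.items.filter (fun e => decide (w ∈ pvKeys e.2))).map Prod.fst).count p =
        if w ∈ pvKeys v then 1 else 0 := by
    intro p v hm w
    have hndf : (((d.items.filter (fun e => decide (w ∈ pvKeys e.2)))).map Prod.fst).Nodup :=
      hfstnd.sublist (List.Sublist.map _ List.filter_sublist)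
    by_cases hw : w ∈ pvKeys v
    · rw [if_pos hw]
      exact List.count_eq_one_of_mem hndf
        (List.mem_map.2 ⟨(p, v), List.mem_filter.2 ⟨hm, by simpa using hw⟩, rfl⟩)
    · rw [if_neg hw, List.count_eq_zero]
      intro hmem
      rcases List.mem_map.1 hmem with ⟨e, hef, hfst⟩
      have hei : e ∈ d.items := (List.mem_filter.1 hef).1
      have heq : e = (p, v) := pv_eq_of_fst_eq hfstnd hei hm (by simpa using hfst)
      have hwv := (List.mem_filter.1 hef).2
      rw [heq] at hwv
      simp only [decide_eq_true_eq] at hwv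
      exact hw hwv
  have hsum : (idx.keys.map ((fun S => ((S.count p1 : Int)) * ((S.count p2 : Int))) ∘
        fun k => idx.getD k [])).sum =
      (idx.keys.map (fun w => if decide (w ∈ pvKeys v1 ∧ w ∈ pvKeys v2) = true then (1 : Int) else 0)).sum := by
    apply congrArg List.sum
    apply List.map_congr_left
    intro w _
    simp only [Function.comp]
    rw [hS w, hcnt p1 v1 h1 w, hcnt p2 v2 h2 w]
    by_cases hw1 : w ∈ pvKeys v1 <;> by_cases hw2 : w ∈ pvKeys v2 <;> simp [hw1, hw2]
  rw [hsum, PySem.List.sum_map_ite_one_zero]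
  have hsub : ∀ w ∈ pvKeys v1, w ∈ idx.keys := by
    intro w hw
    rw [hidx]
    exact (pv_idx_mem_keys _ _ _).2 (Or.inr ⟨(p1, v1), h1, hw⟩)
  simpa using pv_countP_inter idx.keys hkeysnd v1 v2 hsub

-- the two programs agree
theorem pv_main (l : List (String × List (String × Int))) :
    get_voc_comparison l = get_voc_comparison_alt l := by
  simp only [get_voc_comparison, get_voc_comparison_alt]
  have hnd : (PySem.Dict.ofList l).keys.Nodup := PySem.Dict.nodup_keys_ofList _
  set d := PySem.Dict.ofList l with hd
  have hfstnd : (d.items.map Prod.fst).Nodup := by simpa [PySem.Dict.keys] using hnd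
  rw [PySem.Dict.items_foldl_insert_fresh d.items (fun e => e.1) _ PySem.Dict.empty
        (fun a _ => by simp [PySem.Dict.contains_empty]) (by simpa [PySem.Dict.keys] using hnd),
      PySem.Dict.items_foldl_insert_fresh d.keys (fun p1 => p1) _ PySem.Dict.empty
        (fun a _ => by simp [PySem.Dict.contains_empty]) (by simpa using hnd)]
  have hempty : (PySem.Dict.empty : PySem.Dict String (List String)).items = [] := rfl
  rw [hempty]
  simp only [List.nil_append]
  have hkeys : d.keys = d.items.map Prod.fst := by simp [PySem.Dict.keys]
  have hvals : d.values = d.items.map Prod.snd := by simp [PySem.Dict.values]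
  conv_rhs => rw [hkeys, List.map_map]
  apply List.map_congr_left
  intro e he
  have hget : d.getD e.1 [] = e.2 := PySem.Dict.getD_of_mem_items d (by simpa using he) hnd []
  simp only [Function.comp, hget]
  congr 1
  rw [PySem.List.foldl_append_singleton_eq_map, List.nil_append]
  by_cases h0 : ((pvKeys e.2).length : Int) = 0
  · rw [if_pos h0]
    have hc : ∀ freq, pvCompare e.2 freq = 0 := by
      intro freq
      simp only [pvCompare, if_pos h0]
    have : d.values.map (fun freq => PySem.Int.toStr (pvCompare e.2 freq) ++ "%") =
        d.values.map (fun _ => "0%") := by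
      apply List.map_congr_left
      intro freq _
      rw [hc freq]
      rfl
    rw [this, List.map_const']
    congr 1
    rw [hvals]
    simp
  · rw [if_neg h0]
    simp only [hvals, List.map_map]
    apply List.map_congr_left
    intro e2 he2
    simp only [Function.comp]
    simp only [pvCompare]
    rw [if_neg h0]
    rw [pv_pairCounts d hnd e.1 e.2 e2.1 e2.2 (by simpa using he) (by simpa using he2)]

-- ===== VERDICT (by name: the statement is the Claim_ definition above) =====
theorem get_voc_comparison_spec : Claim_equal_get_voc_comparison := by
  intro l _
  unfold Spec_get_voc_comparison
  exact pv_main l
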